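-- pv_equiv track=rewrite | github.com/blackboxprogramming/blackroad-prism-console | tools/prism/key_to_json.py | _step
-- ===== SOURCE A (Python) =====
-- BEATS_PER_BAR = 4
--
-- SUBDIVISIONS = 4  # quarter-beat resolution
--
-- def _step(values: tuple[int, int, int], subdivisions: int) -> tuple[int, int, int]:
--     bar, beat, div = values
--     div += subdivisions
--     while div > SUBDIVISIONS:
--         div -= SUBDIVISIONS
--         beat += 1
--     while beat > BEATS_PER_BAR:
--         beat -= BEATS_PER_BAR
--         bar += 1
--     return bar, beat, div
-- ===== SOURCE B (Python) =====
-- BEATS_PER_BAR = 4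
--
-- SUBDIVISIONS = 4  # quarter-beat resolution
--
-- def _step(values, subdivisions):
--     # O(1): replace the subtract-loops with 1-indexed divmod carry arithmetic.
--     bar, beat, div = values
--     div += subdivisions
--     beat_carry = max(0, (div - 1) // SUBDIVISIONS)
--     div -= beat_carry * SUBDIVISIONS
--     beat += beat_carry
--     bar_carry = max(0, (beat - 1) // BEATS_PER_BAR)
--     beat -= bar_carry * BEATS_PER_BAR
--     bar += bar_carry
--     return bar, beat, div
-- ===== Notes on version B (the rewrite author's own statement) =====
-- stated objective: faster
-- what changed: Replaced the two subtract-until-in-range while loops with closed-form 1-indexed floor-division carry arithmetic (max(0,(x-1)//4)), making the step O(1) instead of O(subdivisions).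
import Mathlib
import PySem

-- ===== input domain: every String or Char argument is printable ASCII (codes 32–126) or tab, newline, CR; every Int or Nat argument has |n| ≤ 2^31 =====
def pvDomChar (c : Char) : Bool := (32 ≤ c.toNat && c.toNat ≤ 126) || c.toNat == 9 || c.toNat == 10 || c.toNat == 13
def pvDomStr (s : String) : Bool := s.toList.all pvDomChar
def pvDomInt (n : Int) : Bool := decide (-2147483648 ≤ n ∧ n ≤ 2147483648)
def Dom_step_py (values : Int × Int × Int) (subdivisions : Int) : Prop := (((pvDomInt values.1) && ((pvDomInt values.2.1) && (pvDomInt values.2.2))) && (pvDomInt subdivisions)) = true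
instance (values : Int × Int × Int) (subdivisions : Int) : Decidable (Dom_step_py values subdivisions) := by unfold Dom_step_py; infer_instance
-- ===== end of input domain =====

-- B replaces A's two subtract-until-in-range while loops with closed-form
-- 1-indexed floor-division carry arithmetic (objective: faster, O(1) per step).

-- ===== PORT A =====
-- `while div > SUBDIVISIONS: div -= SUBDIVISIONS; beat += 1`  (SUBDIVISIONS = 4)
def pvLoopDivA (beat div : Int) : Int × Int :=
  if div > 4 then pvLoopDivA (beat + 1) (div - 4) else (beat, div)
termination_by div.toNat
decreasing_by omega

-- `while beat > BEATS_PER_BAR: beat -= BEATS_PER_BAR; bar += 1`  (BEATS_PER_BAR = 4)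
def pvLoopBarA (bar beat : Int) : Int × Int :=
  if beat > 4 then pvLoopBarA (bar + 1) (beat - 4) else (bar, beat)
termination_by beat.toNat
decreasing_by omega

def step_py (values : Int × Int × Int) (subdivisions : Int) : Int × Int × Int :=
  let bar := values.1
  let beat := values.2.1
  let div := values.2.2 + subdivisions
  let p := pvLoopDivA beat div
  let q := pvLoopBarA bar p.1
  (q.1, q.2, p.2)

-- ===== PORT B =====
def step_py_alt (values : Int × Int × Int) (subdivisions : Int) : Int × Int × Int :=
  let bar := values.1
  let beat := values.2.1
  let div := values.2.2 + subdivisions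
  let beatCarry := max 0 (PySem.Int.floordiv (div - 1) 4)
  let div2 := div - beatCarry * 4
  let beat2 := beat + beatCarry
  let barCarry := max 0 (PySem.Int.floordiv (beat2 - 1) 4)
  (bar + barCarry, beat2 - barCarry * 4, div2)

-- ===== PRECONDITION & SPEC =====
def Spec_step_py (values : Int × Int × Int) (subdivisions : Int) (out : Int × Int × Int) : Prop := out = step_py_alt values subdivisions
instance (values : Int × Int × Int) (subdivisions : Int) (out : Int × Int × Int) : Decidable (Spec_step_py values subdivisions out) := by unfold Spec_step_py; infer_instance

-- ===== CLAIM (what is proved, stated in full; the proofs are below) =====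
def Claim_equal_step_py : Prop := ∀ (values : Int × Int × Int) (subdivisions : Int), Dom_step_py values subdivisions → Spec_step_py values subdivisions (step_py values subdivisions)

-- ===== LEMMAS AND PROOFS =====
lemma pvLoopDivA_closed : ∀ (n : Nat) (beat div : Int), div.toNat = n →
    pvLoopDivA beat div =
      (beat + max 0 (PySem.Int.floordiv (div - 1) 4),
       div - max 0 (PySem.Int.floordiv (div - 1) 4) * 4) := by
  intro n
  induction n using Nat.strong_induction_on with
  | _ n ih =>
    intro beat div hn
    rw [pvLoopDivA]
    by_cases h : div > 4
    · simp only [if_pos h]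
      rw [ih (div - 4).toNat (by omega) (beat + 1) (div - 4) rfl]
      rw [PySem.Int.floordiv_eq_ediv_of_pos (a := div - 1) (b := 4) (by omega),
          PySem.Int.floordiv_eq_ediv_of_pos (a := div - 4 - 1) (b := 4) (by omega)]
      simp only [Prod.mk.injEq, max_def]; split_ifs <;> constructor <;> omega
    · simp only [if_neg h]
      rw [PySem.Int.floordiv_eq_ediv_of_pos (a := div - 1) (b := 4) (by omega)]
      simp only [Prod.mk.injEq, max_def]; split_ifs <;> constructor <;> omega

lemma pvLoopBarA_closed : ∀ (n : Nat) (bar beat : Int), beat.toNat = n →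
    pvLoopBarA bar beat =
      (bar + max 0 (PySem.Int.floordiv (beat - 1) 4),
       beat - max 0 (PySem.Int.floordiv (beat - 1) 4) * 4) := by
  intro n
  induction n using Nat.strong_induction_on with
  | _ n ih =>
    intro bar beat hn
    rw [pvLoopBarA]
    by_cases h : beat > 4
    · simp only [if_pos h]
      rw [ih (beat - 4).toNat (by omega) (bar + 1) (beat - 4) rfl]
      rw [PySem.Int.floordiv_eq_ediv_of_pos (a := beat - 1) (b := 4) (by omega),
          PySem.Int.floordiv_eq_ediv_of_pos (a := beat - 4 - 1) (b := 4) (by omega)]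
      simp only [Prod.mk.injEq, max_def]; split_ifs <;> constructor <;> omega
    · simp only [if_neg h]
      rw [PySem.Int.floordiv_eq_ediv_of_pos (a := beat - 1) (b := 4) (by omega)]
      simp only [Prod.mk.injEq, max_def]; split_ifs <;> constructor <;> omega

-- ===== VERDICT (by name: the statement is the Claim_ definition above) =====
theorem step_py_spec : Claim_equal_step_py := by
  intro values subdivisions _
  unfold Spec_step_py step_py step_py_alt
  dsimp only
  rw [pvLoopDivA_closed (values.2.2 + subdivisions).toNat _ _ rfl,
      pvLoopBarA_closed (values.2.1 + max 0 (PySem.Int.floordiv (values.2.2 + subdivisions - 1) 4)).toNat _ _ rfl]
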